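-- pv_equiv track=rewrite | github.com/shashidhar0109/Phishing_detection- | backend/intelligence.py | _is_typosquatting
-- ===== SOURCE A (Python) =====
-- def _is_typosquatting(domain: str, brand: str) -> bool:
--     """
--     Check for common typosquatting techniques
--     """
--     # Technique 1: Character substitution (e.g., "rn" looks like "m", "l" vs "1")
--     substitutions = {
--         'rn': 'm', 'm': 'rn',
--         'l': '1', '1': 'l',
--         'o': '0', '0': 'o',
--         'i': '1', '1': 'i',
--         'vv': 'w', 'w': 'vv'
--     }
--
--     # Technique 2: Missing character (e.g., "gogle" vs "google")
--     if len(domain) == len(brand) - 1: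
--         for i in range(len(brand)):
--             if brand[:i] + brand[i+1:] == domain:
--                 return True
--
--     # Technique 3: Extra character (e.g., "gooogle" vs "google")
--     if len(domain) == len(brand) + 1:
--         for i in range(len(domain)):
--             if domain[:i] + domain[i+1:] == brand:
--                 return True
--
--     # Technique 4: Transposition (e.g., "googel" vs "google")
--     if len(domain) == len(brand):
--         for i in range(len(domain) - 1):
--             if (domain[:i] + domain[i+1] + domain[i] + domain[i+2:]) == brand:
--                 return True
--
--     # Technique 5: Double character (e.g., "airtell" vs "airtel")
--     for i in range(len(domain) - 1):
--         if domain[i] == domain[i+1]: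
--             test = domain[:i] + domain[i+1:]
--             if test == brand:
--                 return True
--
--     # Technique 6: Homoglyph substitution (visually similar characters)
--     # Already checked with similarity score
--
--         return False
-- ===== SOURCE B (Python) =====
-- def _is_typosquatting(domain: str, brand: str) -> bool:
--     # One linear scan per edit type: skip the common prefix, then compare
--     # the remaining suffixes directly (no slice-rebuild per index).
--     if len(domain) + 1 == len(brand):
--         return _is_one_deletion(brand, domain)
--     if len(domain) == len(brand) + 1:
--         return _is_one_deletion(domain, brand)
--     if len(domain) == len(brand):
--         i = 0
--         n = len(domain)
--         while i < n and domain[i] == brand[i]: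
--             i += 1
--         if i >= n - 1:
--             return False
--         return (domain[i] == brand[i + 1] and domain[i + 1] == brand[i]
--                 and domain[i + 2:] == brand[i + 2:])
--     return False
--
--
-- def _is_one_deletion(longer: str, shorter: str) -> bool:
--     # longer becomes shorter by deleting exactly one character
--     i = 0
--     while i < len(shorter) and longer[i] == shorter[i]:
--         i += 1
--     return longer[i + 1:] == shorter[i:]
-- ===== Notes on version B (the rewrite author's own statement) =====
-- stated objective: faster
-- what changed: B does one prefix-scan per edit type (skip common prefix, compare the remaining suffixes once) instead of A's loop that rebuilds and compares a full slice-copy at every index; Pre_ excludes inputs where A falls off the end and returns None instead of a bool (len(domain) < 2 with no edit match).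
-- intended difference: When domain == brand and domain contains an adjacent doubled character (e.g. 'google','google'), A returns True via its transposition loop (swapping two equal characters), while B returns False: an identical domain is not a typosquat. — e.g. on _is_typosquatting("aa", "aa"): A returns true, B returns false
-- outside the precondition, e.g. on _is_typosquatting('', ''): A returns None, B returns False; on _is_typosquatting('a', 'bc'): A returns None, B returns False
import Mathlib
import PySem

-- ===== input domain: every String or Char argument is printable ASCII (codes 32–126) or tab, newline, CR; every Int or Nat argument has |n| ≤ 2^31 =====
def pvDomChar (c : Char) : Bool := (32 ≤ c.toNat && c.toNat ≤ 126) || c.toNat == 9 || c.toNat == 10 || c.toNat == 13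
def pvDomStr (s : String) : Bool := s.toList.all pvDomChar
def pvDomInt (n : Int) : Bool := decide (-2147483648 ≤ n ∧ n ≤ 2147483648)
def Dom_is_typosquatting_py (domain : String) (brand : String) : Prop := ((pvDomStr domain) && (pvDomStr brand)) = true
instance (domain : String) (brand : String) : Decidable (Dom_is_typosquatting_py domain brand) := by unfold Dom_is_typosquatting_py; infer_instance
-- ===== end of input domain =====

-- B replaces A's per-index slice-rebuild-and-compare loops by one linear prefix scan per
-- edit type (objective: faster; a timing run measures the claim).


-- ===== PORT A =====
-- Technique 2: missing character — for i in range(len(brand)): brand[:i] + brand[i+1:] == domain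
def pvTech2 (d b : List Char) : Bool :=
  if (d.length : Int) = (b.length : Int) - 1 then
    (PySem.List.pyRange 0 (b.length : Int) 1).any (fun i =>
      (PySem.List.slice b none (some i) ++ PySem.List.slice b (some (i + 1)) none) == d)
  else false

-- Technique 3: extra character — for i in range(len(domain)): domain[:i] + domain[i+1:] == brand
def pvTech3 (d b : List Char) : Bool :=
  if (d.length : Int) = (b.length : Int) + 1 then
    (PySem.List.pyRange 0 (d.length : Int) 1).any (fun i =>
      (PySem.List.slice d none (some i) ++ PySem.List.slice d (some (i + 1)) none) == b)
  else false

-- Technique 4: transposition — domain[:i] + domain[i+1] + domain[i] + domain[i+2:] == brand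
-- (the loop indices i, i+1 are always in range, so pyGetD is exact here)
def pvTech4 (d b : List Char) : Bool :=
  if (d.length : Int) = (b.length : Int) then
    (PySem.List.pyRange 0 ((d.length : Int) - 1) 1).any (fun i =>
      (PySem.List.slice d none (some i)
        ++ [PySem.List.pyGetD d (i + 1) default] ++ [PySem.List.pyGetD d i default]
        ++ PySem.List.slice d (some (i + 2)) none) == b)
  else false

-- Technique 5: A's `return False` is mis-indented to the end of the loop body, so only the
-- FIRST index of the range is ever examined; on an empty range Python falls off the end and
-- returns None (those inputs are outside Pre_; the port returns false there).
def pvTech5 (d b : List Char) : Bool :=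
  ((PySem.List.pyRange 0 ((d.length : Int) - 1) 1).head?).elim false (fun i =>
    if PySem.List.pyGetD d i default = PySem.List.pyGetD d (i + 1) default then
      (PySem.List.slice d none (some i) ++ PySem.List.slice d (some (i + 1)) none) == b
    else false)

def is_typosquatting_py (domain : String) (brand : String) : Bool :=
  let d := domain.toList
  let b := brand.toList
  if pvTech2 d b then true
  else if pvTech3 d b then true
  else if pvTech4 d b then true
  else pvTech5 d b

-- ===== PORT B =====
-- _is_one_deletion: skip the common prefix, then longer[i+1:] == shorter[i:]
def pvOneDel : List Char → List Char → Bool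
  | x :: xs, y :: ys => if x = y then pvOneDel xs ys else xs == y :: ys
  | longer, [] => longer.drop 1 == []
  | [], _ :: _ => false   -- unreachable on B's call pattern (|longer| = |shorter| + 1)

-- equal-length branch: skip the common prefix, then check one adjacent swap and equal tails
def pvTransScan : List Char → List Char → Bool
  | x :: xs, y :: ys =>
      if x = y then pvTransScan xs ys
      else
        match xs, ys with
        | x2 :: xs2, y2 :: ys2 => x == y2 && x2 == y && xs2 == ys2
        | _, _ => false
  | _, _ => false

def is_typosquatting_py_alt (domain : String) (brand : String) : Bool :=
  let d := domain.toList
  let b := brand.toList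
  if (d.length : Int) + 1 = (b.length : Int) then pvOneDel b d
  else if (d.length : Int) = (b.length : Int) + 1 then pvOneDel d b
  else if (d.length : Int) = (b.length : Int) then pvTransScan d b
  else false

-- ===== PRECONDITION & SPEC =====
-- Pre_ excludes exactly the inputs on which A falls off the end and returns None instead of a
-- bool: len(domain) < 2 and no technique fires (the two disjuncts besides 2 ≤ length cover the
-- short inputs on which a technique does return True, so A yields a bool there).
def Pre_is_typosquatting_py (domain : String) (brand : String) : Prop :=
  2 ≤ domain.toList.length ∨
  (domain.toList.length + 1 = brand.toList.length ∧ ∀ c ∈ domain.toList, c ∈ brand.toList) ∨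
  (domain.toList.length = 1 ∧ brand = "")
instance (domain : String) (brand : String) : Decidable (Pre_is_typosquatting_py domain brand) := by unfold Pre_is_typosquatting_py; infer_instance

def pvWitness_is_typosquatting_py : String × String := ("gogle", "google")

-- When domain = brand and domain contains an adjacent doubled character, A returns True (its
-- transposition loop swaps two equal characters and matches), while B returns False: an
-- identical domain is not a typosquat, so B's value is the intended one.
def D_is_typosquatting_py (domain : String) (brand : String) : Prop :=
  domain = brand ∧ ¬ List.IsChain (fun a b => a ≠ b) domain.toList
instance (domain : String) (brand : String) : Decidable (D_is_typosquatting_py domain brand) := by unfold D_is_typosquatting_py; infer_instance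

def Spec_is_typosquatting_py (domain : String) (brand : String) (out : Bool) : Prop := ¬ D_is_typosquatting_py domain brand → out = is_typosquatting_py_alt domain brand
instance (domain : String) (brand : String) (out : Bool) : Decidable (Spec_is_typosquatting_py domain brand out) := by unfold Spec_is_typosquatting_py; infer_instance

def pvDiffWitness_is_typosquatting_py : String × String := ("aa", "aa")
def pvDiffWitnessOut_is_typosquatting_py : Bool × Bool := (true, false)

-- ===== CLAIM (what is proved, stated in full; the proofs are below) =====
def Claim_unchanged_is_typosquatting_py : Prop := ∀ (domain : String) (brand : String), Dom_is_typosquatting_py domain brand → Pre_is_typosquatting_py domain brand → Spec_is_typosquatting_py domain brand (is_typosquatting_py domain brand)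
def Claim_changed_is_typosquatting_py : Prop := Dom_is_typosquatting_py (pvDiffWitness_is_typosquatting_py.1) (pvDiffWitness_is_typosquatting_py.2) ∧ Pre_is_typosquatting_py (pvDiffWitness_is_typosquatting_py.1) (pvDiffWitness_is_typosquatting_py.2) ∧ D_is_typosquatting_py (pvDiffWitness_is_typosquatting_py.1) (pvDiffWitness_is_typosquatting_py.2) ∧ is_typosquatting_py (pvDiffWitness_is_typosquatting_py.1) (pvDiffWitness_is_typosquatting_py.2) = pvDiffWitnessOut_is_typosquatting_py.1 ∧ is_typosquatting_py_alt (pvDiffWitness_is_typosquatting_py.1) (pvDiffWitness_is_typosquatting_py.2) = pvDiffWitnessOut_is_typosquatting_py.2 ∧ pvDiffWitnessOut_is_typosquatting_py.1 ≠ pvDiffWitnessOut_is_typosquatting_py.2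
def Claim_exact_is_typosquatting_py : Prop := ∀ (domain : String) (brand : String), Dom_is_typosquatting_py domain brand → Pre_is_typosquatting_py domain brand → D_is_typosquatting_py domain brand → is_typosquatting_py domain brand ≠ is_typosquatting_py_alt domain brand

-- ===== LEMMAS AND PROOFS =====

-- "deleting one character of L at some index yields T"
def DelEx (L T : List Char) : Prop := ∃ k, k < L.length ∧ L.take k ++ L.drop (k + 1) = T
-- "swapping two adjacent characters of d at some index yields b"
def SwapEx (d b : List Char) : Prop :=
  ∃ k, k + 2 ≤ d.length ∧
    d.take k ++ d.getD (k + 1) default :: d.getD k default :: d.drop (k + 2) = b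

lemma bool_eq_false {x : Bool} (h : ¬ x = true) : x = false := by
  cases x
  · rfl
  · exact absurd rfl h

lemma delEx_cons_iff (x : Char) (xs T : List Char) :
    DelEx (x :: xs) T ↔ xs = T ∨ ∃ ys, T = x :: ys ∧ DelEx xs ys := by
  constructor
  · rintro ⟨k, hk, he⟩
    cases k with
    | zero => exact Or.inl (by simpa using he)
    | succ k =>
      refine Or.inr ⟨xs.take k ++ xs.drop (k + 1), ?_, ⟨k, ?_, rfl⟩⟩
      · rw [← he]; simp
      · simp only [List.length_cons] at hk; omega
  · rintro (rfl | ⟨ys, rfl, k, hk, he⟩)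
    · exact ⟨0, by simp only [List.length_cons]; omega, by simp⟩
    · exact ⟨k + 1, by simp only [List.length_cons]; omega, by simp [he]⟩

lemma swapEx_cons_iff (x : Char) (xs b : List Char) :
    SwapEx (x :: xs) b ↔
      (∃ x2 xs2, xs = x2 :: xs2 ∧ b = x2 :: x :: xs2) ∨
      (∃ ys, b = x :: ys ∧ SwapEx xs ys) := by
  constructor
  · rintro ⟨k, hk, he⟩
    cases k with
    | zero =>
      obtain ⟨x2, xs2, rfl⟩ : ∃ x2 xs2, xs = x2 :: xs2 := by
        cases xs with
        | nil => simp only [List.length_cons, List.length_nil] at hk; omega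
        | cons a t => exact ⟨a, t, rfl⟩
      refine Or.inl ⟨x2, xs2, rfl, ?_⟩
      rw [← he]; simp [List.getD_eq_getElem?_getD]
    | succ k =>
      have hk' : k + 2 ≤ xs.length := by simp only [List.length_cons] at hk; omega
      refine Or.inr ⟨xs.take k ++ xs.getD (k + 1) default :: xs.getD k default :: xs.drop (k + 2),
        ?_, ⟨k, hk', rfl⟩⟩
      rw [← he]; simp [List.getD_eq_getElem?_getD]
  · rintro (⟨x2, xs2, rfl, rfl⟩ | ⟨ys, rfl, k, hk, he⟩)
    · exact ⟨0, by simp only [List.length_cons]; omega, by simp [List.getD_eq_getElem?_getD]⟩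
    · exact ⟨k + 1, by simp only [List.length_cons]; omega,
        by simp [List.getD_eq_getElem?_getD] at he ⊢; simp [he]⟩

lemma del_any_iff (L T : List Char) :
    ((PySem.List.pyRange 0 (L.length : Int) 1).any (fun i =>
      (PySem.List.slice L none (some i) ++ PySem.List.slice L (some (i + 1)) none) == T)) = true
    ↔ DelEx L T := by
  rw [List.any_eq_true]
  constructor
  · rintro ⟨i, him, hp⟩
    rw [PySem.List.mem_pyRange_one] at him
    obtain ⟨h0, h1⟩ := him
    rw [PySem.List.slice_to L h0, PySem.List.slice_from L (by omega : (0 : Int) ≤ i + 1),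
      beq_iff_eq] at hp
    refine ⟨i.toNat, by omega, ?_⟩
    have ht : (i + 1).toNat = i.toNat + 1 := by omega
    rw [ht] at hp
    exact hp
  · rintro ⟨k, hk, he⟩
    refine ⟨(k : Int), ?_, ?_⟩
    · rw [PySem.List.mem_pyRange_one]
      exact ⟨Int.natCast_nonneg k, by exact_mod_cast hk⟩
    · rw [PySem.List.slice_to L (Int.natCast_nonneg k),
        PySem.List.slice_from L (by positivity : (0 : Int) ≤ (k : Int) + 1), beq_iff_eq]
      have ht : ((k : Int) + 1).toNat = k + 1 := by omega
      rw [ht, Int.toNat_natCast]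
      exact he

lemma tech2_iff (d b : List Char) (h : (d.length : Int) = (b.length : Int) - 1) :
    pvTech2 d b = true ↔ DelEx b d := by
  unfold pvTech2
  rw [if_pos h]
  exact del_any_iff b d

lemma tech3_iff (d b : List Char) (h : (d.length : Int) = (b.length : Int) + 1) :
    pvTech3 d b = true ↔ DelEx d b := by
  unfold pvTech3
  rw [if_pos h]
  exact del_any_iff d b

lemma tech4_iff (d b : List Char) (h : d.length = b.length) :
    pvTech4 d b = true ↔ SwapEx d b := by
  unfold pvTech4
  rw [if_pos (by exact_mod_cast h), List.any_eq_true]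
  constructor
  · rintro ⟨i, him, hp⟩
    rw [PySem.List.mem_pyRange_one] at him
    obtain ⟨h0, h1⟩ := him
    rw [PySem.List.slice_to d h0, PySem.List.slice_from d (by omega : (0 : Int) ≤ i + 2),
      PySem.List.pyGetD_of_nonneg d default (by omega : (0 : Int) ≤ i + 1),
      PySem.List.pyGetD_of_nonneg d default h0, beq_iff_eq] at hp
    have e2 : (i + 2).toNat = i.toNat + 2 := by omega
    have e1 : (i + 1).toNat = i.toNat + 1 := by omega
    rw [e2, e1] at hp
    refine ⟨i.toNat, by omega, ?_⟩
    rw [← hp]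
    simp
  · rintro ⟨k, hk, he⟩
    refine ⟨(k : Int), ?_, ?_⟩
    · rw [PySem.List.mem_pyRange_one]
      exact ⟨Int.natCast_nonneg k, by omega⟩
    · rw [PySem.List.slice_to d (Int.natCast_nonneg k),
        PySem.List.slice_from d (by positivity : (0 : Int) ≤ (k : Int) + 2),
        PySem.List.pyGetD_of_nonneg d default (by positivity : (0 : Int) ≤ (k : Int) + 1),
        PySem.List.pyGetD_of_nonneg d default (Int.natCast_nonneg k), beq_iff_eq]
      have e2 : ((k : Int) + 2).toNat = k + 2 := by omega
      have e1 : ((k : Int) + 1).toNat = k + 1 := by omega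
      rw [e2, e1, Int.toNat_natCast, ← he]
      simp

lemma pvOneDel_iff (L S : List Char) (h : L.length = S.length + 1) :
    pvOneDel L S = true ↔ DelEx L S := by
  induction S generalizing L with
  | nil =>
    have hL : L ≠ [] := by intro hh; rw [hh] at h; simp at h
    obtain ⟨x, L', rfl⟩ := List.exists_cons_of_ne_nil hL
    obtain rfl : L' = [] := by simpa using h
    constructor
    · intro _; exact ⟨0, by simp, by simp⟩
    · intro _; rfl
  | cons y ys ih =>
    have hL : L ≠ [] := by intro hh; rw [hh] at h; simp at h
    obtain ⟨x, xs, rfl⟩ := List.exists_cons_of_ne_nil hL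
    have hx : xs.length = ys.length + 1 := by simpa using h
    by_cases hxy : x = y
    · subst hxy
      have e1 : pvOneDel (x :: xs) (x :: ys) = pvOneDel xs ys := by
        simp only [pvOneDel]; rw [if_pos trivial]
      rw [e1, ih xs hx, delEx_cons_iff]
      constructor
      · intro hdel; exact Or.inr ⟨ys, rfl, hdel⟩
      · rintro (hxse | ⟨ys', hcons, hdel⟩)
        · exact ⟨0, by rw [hxse]; simp only [List.length_cons]; omega, by rw [hxse]; simp⟩
        · injection hcons with _ h2
          subst h2
          exact hdel
    · have e1 : pvOneDel (x :: xs) (y :: ys) = (xs == y :: ys) := by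
        simp only [pvOneDel]; rw [if_neg hxy]
      rw [e1, delEx_cons_iff, beq_iff_eq]
      constructor
      · exact fun hh => Or.inl hh
      · rintro (hh | ⟨ys', hcons, _⟩)
        · exact hh
        · exact absurd (by injection hcons with h1 _; exact h1.symm) hxy

lemma pvTransScan_self : ∀ (l : List Char), pvTransScan l l = false
  | [] => rfl
  | x :: xs => by
      have e1 : pvTransScan (x :: xs) (x :: xs) = pvTransScan xs xs := by
        simp only [pvTransScan]; rw [if_pos trivial]
      rw [e1]
      exact pvTransScan_self xs

lemma pvTransScan_iff (d b : List Char) (h : d.length = b.length) (hne : d ≠ b) :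
    pvTransScan d b = true ↔ SwapEx d b := by
  induction d generalizing b with
  | nil =>
    obtain rfl : b = [] := by
      cases b with
      | nil => rfl
      | cons a t => simp at h
    exact absurd rfl hne
  | cons x xs ih =>
    obtain ⟨y, ys, rfl⟩ : ∃ y ys, b = y :: ys := by
      cases b with
      | nil => simp at h
      | cons a t => exact ⟨a, t, rfl⟩
    have hlen : xs.length = ys.length := by simpa using h
    by_cases hxy : x = y
    · subst hxy
      have hne' : xs ≠ ys := fun hh => hne (by rw [hh])
      have e1 : pvTransScan (x :: xs) (x :: ys) = pvTransScan xs ys := by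
        simp only [pvTransScan]; rw [if_pos trivial]
      rw [e1, ih ys hlen hne', swapEx_cons_iff]
      constructor
      · intro hs; exact Or.inr ⟨ys, rfl, hs⟩
      · rintro (⟨x2, xs2, rfl, hb⟩ | ⟨ys', hcons, hs⟩)
        · injection hb with h1 h2
          exact absurd (by rw [h2, ← h1]) hne'
        · injection hcons with _ h2
          subst h2
          exact hs
    · cases xs with
      | nil =>
        obtain rfl : ys = [] := by
          cases ys with
          | nil => rfl
          | cons a t => simp at hlen
        have e1 : pvTransScan (x :: ([] : List Char)) (y :: []) = false := by
          simp only [pvTransScan]; rw [if_neg hxy]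
        rw [e1, swapEx_cons_iff]
        constructor
        · intro hm; simp at hm
        · rintro (⟨x2, xs2, hxs, _⟩ | ⟨ys', hcons, _⟩)
          · exact absurd hxs (by simp)
          · injection hcons with f1 _
            exact absurd f1.symm hxy
      | cons x2 xs2 =>
        obtain ⟨y2, ys2, rfl⟩ : ∃ y2 ys2, ys = y2 :: ys2 := by
          cases ys with
          | nil => simp at hlen
          | cons a t => exact ⟨a, t, rfl⟩
        have e1 : pvTransScan (x :: x2 :: xs2) (y :: y2 :: ys2) =
            (x == y2 && x2 == y && xs2 == ys2) := by
          simp only [pvTransScan]; rw [if_neg hxy]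
        rw [e1, swapEx_cons_iff]
        constructor
        · intro hm
          simp only [Bool.and_eq_true, beq_iff_eq] at hm
          obtain ⟨⟨h1, h2⟩, h3⟩ := hm
          exact Or.inl ⟨x2, xs2, rfl, by rw [← h2, h1, ← h3]⟩
        · rintro (⟨x2', xs2', hxs, hb⟩ | ⟨ys', hcons, _⟩)
          · injection hxs with e2 e3
            injection hb with f1 f2
            injection f2 with f3 f4
            simp only [Bool.and_eq_true, beq_iff_eq]
            refine ⟨⟨f3.symm, ?_⟩, ?_⟩
            · rw [e2, ← f1]
            · rw [e3, ← f4]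
          · injection hcons with f1 _
            exact absurd f1.symm hxy

lemma swapEx_self_iff : ∀ (l : List Char),
    SwapEx l l ↔ ¬ List.IsChain (fun a b => a ≠ b) l := by
  intro l
  induction l with
  | nil =>
    simp [SwapEx]
  | cons x xs ih =>
    rw [swapEx_cons_iff]
    cases xs with
    | nil =>
      simp [SwapEx]
    | cons x2 xs2 =>
      rw [List.isChain_cons_cons]
      constructor
      · rintro (⟨x2', xs2', hxs, hb⟩ | ⟨ys, hcons, hs⟩)
        · injection hxs with e1 e2
          injection hb with f1 f2
          intro hch
          exact hch.1 (f1.trans e1.symm)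
        · injection hcons with _ g2
          intro hch
          exact (ih.mp (g2 ▸ hs)) hch.2
      · intro hn
        by_cases hx2 : x = x2
        · exact Or.inl ⟨x2, xs2, rfl, by rw [hx2]⟩
        · refine Or.inr ⟨x2 :: xs2, rfl, ih.mpr ?_⟩
          intro hch
          exact hn ⟨hx2, hch⟩

lemma tech5_char (d b : List Char) (h2 : 2 ≤ d.length) :
    pvTech5 d b = (if d.getD 0 default = d.getD 1 default then (d.drop 1 == b) else false) := by
  unfold pvTech5
  rw [PySem.List.pyRange_one_cons (by omega : (0 : Int) < (d.length : Int) - 1)]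
  simp only [List.head?_cons, Option.elim]
  rw [PySem.List.pyGetD_of_nonneg d default (le_refl (0 : Int)),
    PySem.List.pyGetD_of_nonneg d default (by norm_num : (0 : Int) ≤ 0 + 1),
    PySem.List.slice_to d (le_refl (0 : Int)),
    PySem.List.slice_from d (by norm_num : (0 : Int) ≤ 0 + 1)]
  norm_num

lemma tech5_eq_false (d b : List Char) (h2 : 2 ≤ d.length) (hlen : d.length ≠ b.length + 1) :
    pvTech5 d b = false := by
  rw [tech5_char d b h2]
  split
  · rw [beq_eq_false_iff_ne]
    intro hh
    apply hlen
    have := congrArg List.length hh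
    simp at this
    omega
  · rfl

lemma tech5_of_no_del (d b : List Char) (h2 : 2 ≤ d.length) (hnd : ¬ DelEx d b) :
    pvTech5 d b = false := by
  rw [tech5_char d b h2]
  split
  · rw [beq_eq_false_iff_ne]
    intro hh
    exact hnd ⟨0, by omega, by simpa using hh⟩
  · rfl

lemma small_del (d b : List Char) (h1 : d.length ≤ 1) (h : d.length + 1 = b.length)
    (hsub : ∀ c ∈ d, c ∈ b) : DelEx b d := by
  cases d with
  | nil =>
    obtain ⟨u, rfl⟩ : ∃ u, b = [u] := by
      cases b with
      | nil => simp at h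
      | cons u t =>
        cases t with
        | nil => exact ⟨u, rfl⟩
        | cons v t' => simp at h
    exact ⟨0, by simp, by simp⟩
  | cons c d' =>
    obtain rfl : d' = [] := by
      cases d' with
      | nil => rfl
      | cons e t => simp at h1
    obtain ⟨u, v, rfl⟩ : ∃ u v, b = [u, v] := by
      cases b with
      | nil => simp at h
      | cons u t =>
        cases t with
        | nil => simp at h
        | cons v t' =>
          cases t' with
          | nil => exact ⟨u, v, rfl⟩
          | cons w t'' => simp at h
    have hc := hsub c (by simp)
    simp at hc
    rcases hc with rfl | rfl
    · exact ⟨1, by simp, by simp⟩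
    · exact ⟨0, by simp, by simp⟩

lemma tech2_false (d b : List Char) (h : (d.length : Int) ≠ (b.length : Int) - 1) :
    pvTech2 d b = false := by
  unfold pvTech2; rw [if_neg h]

lemma tech3_false (d b : List Char) (h : (d.length : Int) ≠ (b.length : Int) + 1) :
    pvTech3 d b = false := by
  unfold pvTech3; rw [if_neg h]

lemma tech4_false (d b : List Char) (h : (d.length : Int) ≠ (b.length : Int)) :
    pvTech4 d b = false := by
  unfold pvTech4; rw [if_neg h]

lemma chain_of_short (l : List Char) (h : l.length ≤ 1) :
    List.IsChain (fun a b => a ≠ b) l := by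
  cases l with
  | nil => exact List.isChain_nil
  | cons x t =>
    cases t with
    | nil => exact List.isChain_singleton x
    | cons y t' => simp at h

lemma A_or (domain brand : String) :
    is_typosquatting_py domain brand =
      (pvTech2 domain.toList brand.toList || (pvTech3 domain.toList brand.toList ||
       (pvTech4 domain.toList brand.toList || pvTech5 domain.toList brand.toList))) := by
  simp only [is_typosquatting_py]
  cases pvTech2 domain.toList brand.toList <;>
    cases pvTech3 domain.toList brand.toList <;>
      cases pvTech4 domain.toList brand.toList <;> simp

lemma B_ite (domain brand : String) :
    is_typosquatting_py_alt domain brand =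
      (if (domain.toList.length : Int) + 1 = (brand.toList.length : Int) then
        pvOneDel brand.toList domain.toList
       else if (domain.toList.length : Int) = (brand.toList.length : Int) + 1 then
        pvOneDel domain.toList brand.toList
       else if (domain.toList.length : Int) = (brand.toList.length : Int) then
        pvTransScan domain.toList brand.toList
       else false) := rfl

lemma main_list (d b : List Char)
    (hpre : 2 ≤ d.length ∨ (d.length + 1 = b.length ∧ ∀ c ∈ d, c ∈ b) ∨
      (d.length = 1 ∧ b = []))
    (hnd : d = b → List.IsChain (fun a b => a ≠ b) d) :
    (pvTech2 d b || (pvTech3 d b || (pvTech4 d b || pvTech5 d b))) =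
      (if (d.length : Int) + 1 = (b.length : Int) then pvOneDel b d
       else if (d.length : Int) = (b.length : Int) + 1 then pvOneDel d b
       else if (d.length : Int) = (b.length : Int) then pvTransScan d b
       else false) := by
  by_cases h1 : d.length + 1 = b.length
  · rw [if_pos (by omega)]
    have hT2 := tech2_iff d b (by omega)
    have hDel := pvOneDel_iff b d (by omega)
    by_cases hdel : pvOneDel b d = true
    · have ht : pvTech2 d b = true := hT2.mpr (hDel.mp hdel)
      rw [ht, hdel]; simp
    · have hT2f : pvTech2 d b = false := bool_eq_false (fun hx => hdel (hDel.mpr (hT2.mp hx)))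
      have hT3f := tech3_false d b (by omega)
      have hT4f := tech4_false d b (by omega)
      have hT5f : pvTech5 d b = false := by
        by_cases h2 : 2 ≤ d.length
        · exact tech5_eq_false d b h2 (by omega)
        · exfalso
          rcases hpre with hp1 | ⟨hp2a, hp2b⟩ | ⟨hp3a, hp3b⟩
          · omega
          · exact hdel (hDel.mpr (small_del d b (by omega) hp2a hp2b))
          · have hbl : b.length = 0 := by rw [hp3b]; rfl
            omega
      rw [hT2f, hT3f, hT4f, hT5f, bool_eq_false hdel]; simp
  · by_cases h2c : d.length = b.length + 1
    · rw [if_neg (by omega), if_pos (by omega)]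
      have hT3 := tech3_iff d b (by omega)
      have hDel := pvOneDel_iff d b (by omega)
      have hT2f := tech2_false d b (by omega)
      by_cases hdel : pvOneDel d b = true
      · have ht : pvTech3 d b = true := hT3.mpr (hDel.mp hdel)
        rw [hT2f, ht, hdel]; simp
      · have hT3f : pvTech3 d b = false := bool_eq_false (fun hx => hdel (hDel.mpr (hT3.mp hx)))
        have hT4f := tech4_false d b (by omega)
        have hT5f : pvTech5 d b = false := by
          by_cases h2 : 2 ≤ d.length
          · exact tech5_of_no_del d b h2 (fun hdx => hdel (hDel.mpr hdx))
          · exfalso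
            apply hdel
            apply hDel.mpr
            have hb0 : b = [] := List.length_eq_zero_iff.mp (by omega)
            refine ⟨0, by omega, ?_⟩
            rw [hb0]
            simp only [List.take_zero, List.nil_append]
            rw [List.drop_eq_nil_iff]
            omega
        rw [hT2f, hT3f, hT4f, hT5f, bool_eq_false hdel]; simp
    · by_cases h3c : d.length = b.length
      · rw [if_neg (by omega), if_neg (by omega), if_pos (by omega)]
        have hT2f := tech2_false d b (by omega)
        have hT3f := tech3_false d b (by omega)
        have hT4 := tech4_iff d b h3c
        have hlen2 : 2 ≤ d.length := by
          rcases hpre with hp1 | ⟨hp2a, _⟩ | ⟨hp3a, hp3b⟩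
          · exact hp1
          · omega
          · have hbl : b.length = 0 := by rw [hp3b]; rfl
            omega
        by_cases heq : d = b
        · have hch := hnd heq
          have hT4f : pvTech4 d b = false := by
            apply bool_eq_false
            intro hx
            have hsw := hT4.mp hx
            rw [← heq] at hsw
            exact (swapEx_self_iff d).mp hsw hch
          have hT5f := tech5_eq_false d b hlen2 (by omega)
          have hscan : pvTransScan d b = false := by rw [← heq]; exact pvTransScan_self d
          rw [hT2f, hT3f, hT4f, hT5f, hscan]; simp
        · have hScan := pvTransScan_iff d b h3c heq
          by_cases hs : pvTransScan d b = true
          · have ht : pvTech4 d b = true := hT4.mpr (hScan.mp hs)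
            rw [hT2f, hT3f, ht, hs]; simp
          · have hT4f : pvTech4 d b = false :=
              bool_eq_false (fun hx => hs (hScan.mpr (hT4.mp hx)))
            have hT5f := tech5_eq_false d b hlen2 (by omega)
            rw [hT2f, hT3f, hT4f, hT5f, bool_eq_false hs]; simp
      · rw [if_neg (by omega), if_neg (by omega), if_neg (by omega)]
        have hT2f := tech2_false d b (by omega)
        have hT3f := tech3_false d b (by omega)
        have hT4f := tech4_false d b (by omega)
        have hlen2 : 2 ≤ d.length := by
          rcases hpre with hp1 | ⟨hp2a, _⟩ | ⟨hp3a, hp3b⟩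
          · exact hp1
          · omega
          · have hbl : b.length = 0 := by rw [hp3b]; rfl
            omega
        have hT5f := tech5_eq_false d b hlen2 (by omega)
        rw [hT2f, hT3f, hT4f, hT5f]; simp

lemma str_eq_of_toList_eq (a b : String) (h : a.toList = b.toList) : a = b :=
  String.toList_inj.mp h

-- ===== VERDICT (by name: the statement is the Claim_ definition above) =====
theorem is_typosquatting_py_spec : Claim_unchanged_is_typosquatting_py := by
  intro domain brand _ hpre hnd
  show is_typosquatting_py domain brand = is_typosquatting_py_alt domain brand
  rw [A_or, B_ite]
  apply main_list
  · rcases hpre with hp1 | ⟨hp2a, hp2b⟩ | ⟨hp3a, hp3b⟩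
    · exact Or.inl hp1
    · exact Or.inr (Or.inl ⟨hp2a, hp2b⟩)
    · exact Or.inr (Or.inr ⟨hp3a, by rw [hp3b]; rfl⟩)
  · intro heq
    by_contra hch
    exact hnd ⟨str_eq_of_toList_eq domain brand heq, hch⟩

theorem is_typosquatting_py_changed : Claim_changed_is_typosquatting_py := by
  unfold Claim_changed_is_typosquatting_py; decide

theorem is_typosquatting_py_tight : Claim_exact_is_typosquatting_py := by
  intro domain brand _ _ hD
  obtain ⟨hsb, hch⟩ := hD
  subst hsb
  have hlen2 : 2 ≤ domain.toList.length := by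
    by_contra hh
    exact hch (chain_of_short domain.toList (by omega))
  rw [A_or, B_ite]
  rw [if_neg (by omega), if_neg (by omega), if_pos rfl]
  have hT2f := tech2_false domain.toList domain.toList (by omega)
  have hT3f := tech3_false domain.toList domain.toList (by omega)
  have hT4t : pvTech4 domain.toList domain.toList = true :=
    (tech4_iff domain.toList domain.toList rfl).mpr ((swapEx_self_iff domain.toList).mpr hch)
  rw [hT2f, hT3f, hT4t, pvTransScan_self]
  simp
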